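-- pv_equiv track=rewrite | github.com/dislovelhl/acgs-lite | autoresearch/results_utils.py | ceiling_detected
-- ===== SOURCE A (Python) =====
-- KEPT_STATUSES = {"improved", "neutral-kept", "baseline"}
--
-- SIDECAR_MARKER = "[sidecar]"
--
-- DEFAULT_SCOPE = "hot-path"
--
-- def normalize_status(status: str | None) -> str:
--     if status in KEPT_STATUSES:
--         return status
--     if status in {"neutral", "reverted"}:
--         return "discard"
--     return status or ""
--
-- def infer_scope(row: dict[str, str]) -> str:
--     explicit_scope = row.get("scope", "").strip()
--     if explicit_scope in {"hot-path", "sidecar"}: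
--         return explicit_scope
--
--     description = row.get("description", "").strip()
--     if description.startswith(SIDECAR_MARKER):
--         return "sidecar"
--     if "zero hot-path overhead" in description.lower():
--         return "sidecar"
--     return DEFAULT_SCOPE
--
-- def ceiling_detected(
--     rows: list[dict[str, str]],
--     scope: str = "hot-path",
--     window: int = 5,
-- ) -> bool:
--     """Return True if the last `window` runs in `scope` contain no 'improved' result.
--
--     A ceiling means the current architecture has no low-hanging fruit left —
--     it's time to pivot to a different experiment family or architectural approach.
--     """
--     scoped = [r for r in rows if infer_scope(r) == scope]
--     if len(scoped) < window:
--         return False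
--     recent = scoped[-window:]
--     return not any(normalize_status(r.get("status")) == "improved" for r in recent)
-- ===== SOURCE B (Python) =====
-- KEPT_STATUSES = {"improved", "neutral-kept", "baseline"}
--
-- SIDECAR_MARKER = "[sidecar]"
--
-- DEFAULT_SCOPE = "hot-path"
--
--
-- def normalize_status(status):
--     if status in KEPT_STATUSES:
--         return status
--     if status in {"neutral", "reverted"}:
--         return "discard"
--     return status or ""
--
--
-- def infer_scope(row):
--     explicit_scope = row.get("scope", "").strip()
--     if explicit_scope in {"hot-path", "sidecar"}:
--         return explicit_scope
--
--     description = row.get("description", "").strip()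
--     if description.startswith(SIDECAR_MARKER):
--         return "sidecar"
--     if "zero hot-path overhead" in description.lower():
--         return "sidecar"
--     return DEFAULT_SCOPE
--
--
-- def ceiling_detected(rows, scope="hot-path", window=5):
--     """Single backward pass with early stop: examine at most the last `window`
--     rows in `scope`, tracking only a count and an 'improved seen' flag."""
--     seen = 0
--     hit = False
--     for r in reversed(rows):
--         if seen >= window:
--             break
--         if infer_scope(r) == scope:
--             seen += 1
--             if normalize_status(r.get("status")) == "improved":
--                 hit = True
--     return seen >= window and not hit
-- ===== Notes on version B (the rewrite author's own statement) =====
-- stated objective: alternative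
-- what changed: Replaces the forward filter-into-a-list + negative slice + any() with a single early-stopping backward scan that keeps only a counter of scoped rows and an 'improved seen' flag, never materialising the scoped list.
-- outside the precondition, e.g. on ceiling_detected([{'status': 'improved'}], 'hot-path', 0): A returns False, B returns True
import Mathlib
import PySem

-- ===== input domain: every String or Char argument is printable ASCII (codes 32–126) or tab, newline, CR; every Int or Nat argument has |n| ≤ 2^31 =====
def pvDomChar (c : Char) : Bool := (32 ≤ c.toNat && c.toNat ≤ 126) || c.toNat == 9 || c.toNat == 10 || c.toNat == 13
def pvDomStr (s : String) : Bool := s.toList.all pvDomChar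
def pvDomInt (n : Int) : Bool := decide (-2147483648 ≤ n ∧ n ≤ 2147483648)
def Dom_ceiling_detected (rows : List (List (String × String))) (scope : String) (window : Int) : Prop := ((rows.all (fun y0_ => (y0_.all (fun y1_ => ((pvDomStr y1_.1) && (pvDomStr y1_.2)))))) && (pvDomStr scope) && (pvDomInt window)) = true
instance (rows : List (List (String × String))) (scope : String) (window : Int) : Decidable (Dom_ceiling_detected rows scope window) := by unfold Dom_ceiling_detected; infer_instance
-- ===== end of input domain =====

-- B replaces A's forward filter-into-a-list + negative slice + any() by a single
-- early-stopping backward scan keeping only a counter and a flag (alternative decomposition).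


-- ===== PORT A =====
-- shared module helpers (both Pythons define them identically)
def pvNormalizeStatus (status : Option String) : String :=
  match status with
  | some s =>
    if s == "improved" || s == "neutral-kept" || s == "baseline" then s
    else if s == "neutral" || s == "reverted" then "discard"
    else s      -- 'status or ""' : a non-None string s yields s ('' itself yields '')
  | none => ""  -- None: not in either set, 'status or ""' = ''

def pvInferScope (row : List (String × String)) : String :=
  let explicit_scope := PySem.Str.strip (PySem.Dict.getD ⟨row⟩ "scope" "")
  if explicit_scope == "hot-path" || explicit_scope == "sidecar" then explicit_scope
  else
    let description := PySem.Str.strip (PySem.Dict.getD ⟨row⟩ "description" "")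
    if PySem.Str.startswith description "[sidecar]" then "sidecar"
    else if PySem.Str.isIn "zero hot-path overhead" (PySem.Str.lower description) then "sidecar"
    else "hot-path"

def ceiling_detected (rows : List (List (String × String))) (scope : String) (window : Int) : Bool :=
  let scoped_ := rows.filter (fun r => pvInferScope r == scope)
  if (scoped_.length : Int) < window then false
  else
    let recent := PySem.List.slice scoped_ (some (-window)) none
    !(recent.any (fun r => pvNormalizeStatus (PySem.Dict.get? ⟨r⟩ "status") == "improved"))

-- ===== PORT B =====
-- backward scan with early stop: (seen, hit) over the reversed rows
def pvAltLoop (scope : String) (window : Int) : List (List (String × String)) → Int → Bool → Int × Bool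
  | [], seen, hit => (seen, hit)
  | r :: rest, seen, hit =>
    if window ≤ seen then (seen, hit)
    else if pvInferScope r == scope then
      pvAltLoop scope window rest (seen + 1)
        (if pvNormalizeStatus (PySem.Dict.get? ⟨r⟩ "status") == "improved" then true else hit)
    else pvAltLoop scope window rest seen hit

def ceiling_detected_alt (rows : List (List (String × String))) (scope : String) (window : Int) : Bool :=
  let sh := pvAltLoop scope window rows.reverse 0 false
  decide (window ≤ sh.1) && !sh.2

-- ===== PRECONDITION & SPEC =====
-- Pre_ excludes window ≤ 0 (outside the natural domain of a run-count), where A's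
-- returned value is the accident of Python's zero/negative slice scoped_[-window:];
-- B's bounded backward scan naturally returns True there.
def Pre_ceiling_detected (rows : List (List (String × String))) (scope : String) (window : Int) : Prop := 1 ≤ window
instance (rows : List (List (String × String))) (scope : String) (window : Int) : Decidable (Pre_ceiling_detected rows scope window) := by unfold Pre_ceiling_detected; infer_instance
def pvWitness_ceiling_detected : (List (List (String × String))) × String × Int :=
  ([[("status", "improved")], [("scope", "sidecar")], [("status", "neutral")]], "hot-path", 2)
def Spec_ceiling_detected (rows : List (List (String × String))) (scope : String) (window : Int) (out : Bool) : Prop := out = ceiling_detected_alt rows scope window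
instance (rows : List (List (String × String))) (scope : String) (window : Int) (out : Bool) : Decidable (Spec_ceiling_detected rows scope window out) := by unfold Spec_ceiling_detected; infer_instance

-- ===== CLAIM (what is proved, stated in full; the proofs are below) =====
def Claim_equal_ceiling_detected : Prop := ∀ (rows : List (List (String × String))) (scope : String) (window : Int), Dom_ceiling_detected rows scope window → Pre_ceiling_detected rows scope window → Spec_ceiling_detected rows scope window (ceiling_detected rows scope window)

-- ===== LEMMAS AND PROOFS =====

theorem pvAltLoop_eq (scope : String) (window : Int)
    (l : List (List (String × String))) (seen : Int) (hit : Bool)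
    (h0 : 0 ≤ seen) (h : seen ≤ window) :
    pvAltLoop scope window l seen hit =
      (min window (seen + ((l.filter (fun r => pvInferScope r == scope)).length : Int)),
       hit || ((l.filter (fun r => pvInferScope r == scope)).take (window - seen).toNat).any
         (fun r => pvNormalizeStatus (PySem.Dict.get? ⟨r⟩ "status") == "improved")) := by
  induction l generalizing seen hit with
  | nil =>
      simp [pvAltLoop]
      omega
  | cons r rest ih =>
      by_cases hb : window ≤ seen
      · have hse : seen = window := le_antisymm h hb
        have hz : (window - seen).toNat = 0 := by omega
        simp [pvAltLoop, hb, hz]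
        omega
      · by_cases hp : (pvInferScope r == scope) = true
        · have hk : (window - seen).toNat = ((window - (seen + 1)).toNat) + 1 := by omega
          rw [pvAltLoop]
          simp only [hb, if_false, hp, if_true]
          rw [ih (seen + 1) _ (by omega) (by omega)]
          simp only [List.filter_cons, hp, if_true, hk, List.take_succ_cons, List.any_cons]
          simp only [Prod.mk.injEq]
          constructor
          · simp only [List.length_cons]; push_cast; omega
          · cases hq : (pvNormalizeStatus (PySem.Dict.get? ⟨r⟩ "status") == "improved") <;>
              cases hit <;> simp
        · rw [pvAltLoop]
          simp only [hb, if_false, hp, if_false]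
          rw [ih seen hit h0 (by omega)]
          simp [hp]

-- ===== VERDICT (by name: the statement is the Claim_ definition above) =====
theorem ceiling_detected_spec : Claim_equal_ceiling_detected := by
  intro rows scope window _ hpre
  have hw : 1 ≤ window := hpre
  unfold Spec_ceiling_detected ceiling_detected ceiling_detected_alt
  rw [pvAltLoop_eq scope window rows.reverse 0 false le_rfl (by omega)]
  simp only [List.filter_reverse, List.length_reverse, zero_add, Int.sub_zero,
    Bool.false_or]
  by_cases hlt :
      ((rows.filter (fun r => pvInferScope r == scope)).length : Int) < window
  · rw [if_pos hlt]
    have hnot : ¬ window ≤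
        min window ((rows.filter (fun r => pvInferScope r == scope)).length : Int) := by
      omega
    simp [hnot]
  · rw [if_neg hlt]
    have hmin : min window
        ((rows.filter (fun r => pvInferScope r == scope)).length : Int) = window := by
      omega
    rw [hmin]
    simp only [le_refl, decide_true, Bool.true_and]
    have hpos : 0 < window.toNat := by omega
    have hwn : window = ((window.toNat : Int)) := (Int.toNat_of_nonneg (by omega)).symm
    rw [hwn, PySem.List.slice_from_neg_natCast _ _ hpos]
    congr 1
    rw [← List.any_reverse, List.reverse_drop]
    congr 1
    congr 1
    omega
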